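-- pv_equiv track=rewrite | github.com/baldx/text-analysis | main.py | number_of_words
-- ===== SOURCE A (Python) =====
-- def number_of_words(line, word_count_dict, total_words, unique_words):
--     line = punctuation_remover(line)
--     word_in_line = line.split() #creates a list of every word
--
--     for word in word_in_line: #checks each word in the list
--         if word in word_count_dict: #checks if word is in dictionary
--             word_count_dict[word] += 1
--             total_words += 1
--         else:
--             word_count_dict[word] = 1 #adds word key to dictionary
--             unique_words.add(word) #adds unique word to a set
--             total_words += 1
--     return total_words
--
-- def punctuation_remover(line):
--     for char in line: #checks each character in line
--         if char in '''~@#¤%^&*()_-+=<>?/,.;:!{}[]—|'"''': #checks if character is a special character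
--             line = line.replace(char, ' ') #replaces special characters with a space
--     return line
-- ===== SOURCE B (Python) =====
-- PUNCTUATION = '''~@#¤%^&*()_-+=<>?/,.;:!{}[]—|'"'''
--
-- def number_of_words(line, word_count_dict, total_words, unique_words):
--     # one char-map pass instead of repeated str.replace, then a frequency
--     # table so the dict/set update runs once per DISTINCT word; the word
--     # total is the closed form total_words + len(words).
--     words = ''.join(' ' if c in PUNCTUATION else c for c in line).split()
--     counts = {}
--     for w in words:
--         counts[w] = counts.get(w, 0) + 1
--     for w, c in counts.items():
--         if w in word_count_dict:
--             word_count_dict[w] += c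
--         else:
--             word_count_dict[w] = c
--             unique_words.add(w)
--     return total_words + len(words)
-- ===== Notes on version B (the rewrite author's own statement) =====
-- stated objective: alternative
-- what changed: One char-map pass replaces the per-character str.replace loop, a frequency table makes the dict/set update run once per distinct word instead of once per word, and the returned total is the closed form total_words + len(words) instead of an in-loop counter.
import Mathlib
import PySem

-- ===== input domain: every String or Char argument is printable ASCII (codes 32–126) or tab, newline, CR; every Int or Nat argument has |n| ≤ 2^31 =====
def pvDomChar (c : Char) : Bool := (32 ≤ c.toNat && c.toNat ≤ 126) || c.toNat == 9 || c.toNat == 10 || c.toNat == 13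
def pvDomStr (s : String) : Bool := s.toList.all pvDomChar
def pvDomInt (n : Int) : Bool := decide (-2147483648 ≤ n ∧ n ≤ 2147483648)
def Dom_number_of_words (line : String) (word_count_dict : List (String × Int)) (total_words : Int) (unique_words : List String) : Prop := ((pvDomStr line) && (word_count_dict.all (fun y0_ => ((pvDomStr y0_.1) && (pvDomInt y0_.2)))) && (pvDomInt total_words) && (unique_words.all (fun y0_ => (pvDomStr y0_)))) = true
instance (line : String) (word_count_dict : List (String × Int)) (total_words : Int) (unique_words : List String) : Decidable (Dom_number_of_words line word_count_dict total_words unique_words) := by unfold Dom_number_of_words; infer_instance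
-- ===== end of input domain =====

-- B replaces the repeated str.replace passes by one char-map pass and the per-word dict
-- update by a frequency table walked once per distinct word, returning the closed form
-- total_words + len(words); A mutates word_count_dict/unique_words in place and B performs
-- the same mutations in Python — the equivalence proved here is about the RETURN value only.

-- ===== PORT A =====
-- the punctuation string literal of A (contains the two non-ASCII chars '¤' and '—' A uses)
def pvPunctStr : String := "~@#¤%^&*()_-+=<>?/,.;:!{}[]—|'\""

-- A's punctuation_remover: `for char in line` iterates the ORIGINAL string's characters
-- (Python strings are immutable), while `line` is rebuilt by str.replace — a foldl whose
-- accumulator starts at the original line.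
def punctuation_remover (line : String) : String :=
  line.toList.foldl
    (fun cur ch =>
      if PySem.Str.isIn (String.ofList [ch]) pvPunctStr then PySem.Str.replace cur (String.ofList [ch]) " "
      else cur)
    line

def number_of_words (line : String) (word_count_dict : List (String × Int)) (total_words : Int) (unique_words : List String) : Int :=
  let line' := punctuation_remover line
  let word_in_line := PySem.Str.split₀ line'
  let st := word_in_line.foldl
    (fun (s : PySem.Dict String Int × Int × PySem.Set String) word =>
      if s.1.contains word then (s.1.modify word 0 (· + 1), s.2.1 + 1, s.2.2)
      else (s.1.insert word 1, s.2.1 + 1, PySem.Set.add s.2.2 word))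
    (PySem.Dict.mk word_count_dict, total_words, PySem.Set.ofList unique_words)
  st.2.1

-- ===== PORT B =====
def number_of_words_alt (line : String) (word_count_dict : List (String × Int)) (total_words : Int) (unique_words : List String) : Int :=
  let words := PySem.Str.split₀
    (String.ofList (line.toList.map (fun c => if pvPunctStr.toList.contains c then ' ' else c)))
  let counts := words.foldl
    (fun (d : PySem.Dict String Int) w => d.modify w 0 (· + 1)) (PySem.Dict.mk [])
  -- Source B's second loop mutates word_count_dict / unique_words; ported for fidelity, the
  -- return value does not read it
  let _updated := counts.items.foldl
    (fun (du : PySem.Dict String Int × PySem.Set String) wc =>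
      if du.1.contains wc.1 then (du.1.modify wc.1 0 (· + wc.2), du.2)
      else (du.1.insert wc.1 wc.2, PySem.Set.add du.2 wc.1))
    (PySem.Dict.mk word_count_dict, PySem.Set.ofList unique_words)
  total_words + (words.length : Int)

-- ===== PRECONDITION & SPEC =====
def Spec_number_of_words (line : String) (word_count_dict : List (String × Int)) (total_words : Int) (unique_words : List String) (out : Int) : Prop := out = number_of_words_alt line word_count_dict total_words unique_words
instance (line : String) (word_count_dict : List (String × Int)) (total_words : Int) (unique_words : List String) (out : Int) : Decidable (Spec_number_of_words line word_count_dict total_words unique_words out) := by unfold Spec_number_of_words; infer_instance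

-- ===== CLAIM (what is proved, stated in full; the proofs are below) =====
def Claim_equal_number_of_words : Prop := ∀ (line : String) (word_count_dict : List (String × Int)) (total_words : Int) (unique_words : List String), Dom_number_of_words line word_count_dict total_words unique_words → Spec_number_of_words line word_count_dict total_words unique_words (number_of_words line word_count_dict total_words unique_words)

-- ===== LEMMAS AND PROOFS =====

theorem go_singleton (c d : Char) : ∀ (fuel : Nat) (l acc : List Char), l.length ≤ fuel →
    PySem.Chars.replace.go [c] [d] fuel l acc
      = acc.reverse ++ l.map (fun x => if x = c then d else x) := by
  intro fuel
  induction fuel with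
  | zero =>
    intro l acc h
    have hl : l = [] := List.eq_nil_of_length_eq_zero (Nat.le_zero.mp h)
    subst hl
    rw [PySem.Chars.replace.go]
    simp
  | succ n ih =>
    intro l acc h
    cases l with
    | nil =>
      rw [PySem.Chars.replace.go]
      simp
      omega
    | cons x t =>
      rw [PySem.Chars.replace.go]
      by_cases hx : x = c
      · subst hx
        rw [if_pos (by simp)]
        rw [show (List.drop [x].length (x :: t)) = t from rfl,
            show ([d].reverse ++ acc : List Char) = d :: acc from rfl]
        rw [ih t (d :: acc) (Nat.lt_succ_iff.mp (by simpa using h))]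
        simp only [List.reverse_cons, List.map_cons, if_true, List.append_assoc,
          List.singleton_append]
      · have hcx : (c == x) = false := beq_eq_false_iff_ne.mpr (fun h' => hx h'.symm)
        rw [if_neg (by show ¬((c == x) && List.isPrefixOf ([] : List Char) t) = true; simp [hcx])]
        rw [ih t (x :: acc) (Nat.lt_succ_iff.mp (by simpa using h))]
        simp only [List.reverse_cons, List.map_cons, if_neg hx, List.append_assoc,
          List.singleton_append]

theorem replace_singleton (c d : Char) (s : List Char) :
    PySem.Chars.replace s [c] [d] = s.map (fun x => if x = c then d else x) := by
  rw [PySem.Chars.replace]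
  simp only [List.isEmpty_cons, Bool.false_eq_true, if_false]
  rw [go_singleton c d s.length s [] le_rfl]
  simp

theorem fold_replace (cs cur : List Char) :
    cs.foldl
      (fun cur ch =>
        if PySem.Chars.isIn [ch] pvPunctStr.toList then PySem.Chars.replace cur [ch] [' ']
        else cur) cur
    = cur.map (fun x => if cs.contains x && pvPunctStr.toList.contains x then ' ' else x) := by
  induction cs generalizing cur with
  | nil => simp
  | cons ch cs ih =>
    rw [List.foldl_cons]
    have hiff : PySem.Chars.isIn [ch] pvPunctStr.toList = true ↔ ch ∈ pvPunctStr.toList := by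
      rw [PySem.Chars.isIn_iff_infix, List.singleton_infix_iff]
    have hsp : ' ' ∉ pvPunctStr.toList := by decide
    by_cases hch : ch ∈ pvPunctStr.toList
    · rw [if_pos (hiff.mpr hch), ih, replace_singleton, List.map_map]
      apply List.map_congr_left
      intro x _
      simp only [Function.comp_apply]
      by_cases hx : x = ch
      · subst hx; simp [hch, hsp]
      · simp [hx]
    · rw [if_neg (fun h => hch (hiff.mp h)), ih]
      apply List.map_congr_left
      intro x _
      by_cases hx : x = ch
      · subst hx; simp [hch]
      · simp [hx]

theorem fold_str (cs : List Char) (s : String) :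
    (cs.foldl
      (fun cur ch =>
        if PySem.Str.isIn (String.ofList [ch]) pvPunctStr then PySem.Str.replace cur (String.ofList [ch]) " "
        else cur) s).toList
    = cs.foldl
        (fun cur ch =>
          if PySem.Chars.isIn [ch] pvPunctStr.toList then PySem.Chars.replace cur [ch] [' ']
          else cur) s.toList := by
  induction cs generalizing s with
  | nil => rfl
  | cons ch t ih =>
    rw [List.foldl_cons, List.foldl_cons, ih]
    congr 1
    by_cases h : PySem.Chars.isIn [ch] pvPunctStr.toList = true
    · simp [PySem.Str.isIn, h]
    · simp [PySem.Str.isIn, h]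

theorem punctuation_remover_eq (line : String) :
    punctuation_remover line
      = String.ofList (line.toList.map (fun c => if pvPunctStr.toList.contains c then ' ' else c)) := by
  have h2 : (punctuation_remover line).toList
      = line.toList.map (fun c => if pvPunctStr.toList.contains c then ' ' else c) := by
    unfold punctuation_remover
    rw [fold_str, fold_replace]
    apply List.map_congr_left
    intro x hx
    simp [hx]
  calc punctuation_remover line = String.ofList (punctuation_remover line).toList :=
        String.ofList_toList.symm
    _ = _ := by rw [h2]

-- A's word loop adds 1 to the running total per word, whatever the dict/set state
theorem fold_total (words : List String) (d : PySem.Dict String Int) (t : Int) (u : PySem.Set String) :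
    (words.foldl
      (fun (s : PySem.Dict String Int × Int × PySem.Set String) word =>
        if s.1.contains word then (s.1.modify word 0 (· + 1), s.2.1 + 1, s.2.2)
        else (s.1.insert word 1, s.2.1 + 1, PySem.Set.add s.2.2 word))
      (d, t, u)).2.1 = t + (words.length : Int) := by
  induction words generalizing d t u with
  | nil => simp
  | cons w ws ih =>
    simp only [List.foldl_cons, List.length_cons]
    split <;> rw [ih] <;> push_cast <;> ring

-- ===== VERDICT (by name: the statement is the Claim_ definition above) =====
theorem number_of_words_spec : Claim_equal_number_of_words := by
  intro line wcd tw uw _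
  unfold Spec_number_of_words number_of_words number_of_words_alt
  simp only [punctuation_remover_eq, fold_total]
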